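-- pv_equiv track=rewrite | github.com/skrine525/vk-radabot | radabot/core/system.py | int2emoji
-- ===== SOURCE A (Python) =====
-- def int2emoji(number: int):
--     numbers = []
--     while number > 0:
--         numbers.append(number % 10)
--         number = number // 10
--     numbers.reverse()
--
--     emoji = ['0&#8419;', '1&#8419;', '2&#8419;', '3&#8419;', '4&#8419;', '5&#8419;', '6&#8419;', '7&#8419;', '8&#8419;',
--              '9&#8419;']
--     emoji_str = ""
--     for i in numbers:
--         emoji_str += emoji[i]
--
--     return emoji_str
-- ===== SOURCE B (Python) =====
-- def int2emoji(number: int):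
--     if number <= 0:
--         return ""
--     emoji = ['0&#8419;', '1&#8419;', '2&#8419;', '3&#8419;', '4&#8419;', '5&#8419;', '6&#8419;', '7&#8419;', '8&#8419;',
--              '9&#8419;']
--     return "".join(emoji[ord(ch) - 48] for ch in str(number))
-- ===== Notes on version B (the rewrite author's own statement) =====
-- stated objective: idiomatic
-- what changed: Digits are obtained by iterating over str(number) in order (ord(ch)-48) and joined, instead of the mod/floordiv extraction loop plus list reversal plus string accumulation.
import Mathlib
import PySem

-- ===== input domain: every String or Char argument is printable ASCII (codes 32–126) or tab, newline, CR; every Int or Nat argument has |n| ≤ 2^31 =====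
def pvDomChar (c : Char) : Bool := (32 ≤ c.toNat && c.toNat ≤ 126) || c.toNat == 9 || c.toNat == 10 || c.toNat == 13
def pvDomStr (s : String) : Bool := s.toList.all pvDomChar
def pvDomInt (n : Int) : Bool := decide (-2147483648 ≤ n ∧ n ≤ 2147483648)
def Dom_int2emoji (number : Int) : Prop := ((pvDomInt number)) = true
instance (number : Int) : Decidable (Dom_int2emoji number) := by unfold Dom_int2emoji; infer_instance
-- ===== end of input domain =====

-- B replaces A's mod/div digit-extraction loop + reverse + string accumulation by an
-- in-order pass over the decimal string representation (idiomatic; no speed claim).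


-- ===== PORT A =====
-- A's `emoji` table
def emojiA : List String :=
  ["0&#8419;", "1&#8419;", "2&#8419;", "3&#8419;", "4&#8419;", "5&#8419;",
   "6&#8419;", "7&#8419;", "8&#8419;", "9&#8419;"]

-- the `while number > 0` loop building `numbers` (least-significant digit first)
def int2emojiDigitsA (number : Int) : List Int :=
  if _h : 0 < number then
    PySem.Int.mod number 10 :: int2emojiDigitsA (PySem.Int.floordiv number 10)
  else []
termination_by number.toNat
decreasing_by
  rw [PySem.Int.floordiv_eq_ediv_of_pos (by norm_num)]
  omega

def int2emoji (number : Int) : String :=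
  let numbers := (int2emojiDigitsA number).reverse
  -- `emoji[i]`: i is always 0..9 here, so the Python never raises; out-of-range → "" (unreachable)
  numbers.foldl (fun s i => s ++ ((PySem.List.pyGet? emojiA i).getD "")) ""

-- ===== PORT B =====
-- B's `emoji` table
def emojiB : List String :=
  ["0&#8419;", "1&#8419;", "2&#8419;", "3&#8419;", "4&#8419;", "5&#8419;",
   "6&#8419;", "7&#8419;", "8&#8419;", "9&#8419;"]

def int2emoji_alt (number : Int) : String :=
  if number ≤ 0 then ""
  else
    -- "".join(emoji[ord(ch) - 48] for ch in str(number)); out-of-range → "" (unreachable)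
    String.join (((PySem.Int.toStr number).toList).map
      (fun ch => (PySem.List.pyGet? emojiB ((ch.toNat : Int) - 48)).getD ""))

-- ===== PRECONDITION & SPEC =====
def Spec_int2emoji (number : Int) (out : String) : Prop := out = int2emoji_alt number
instance (number : Int) (out : String) : Decidable (Spec_int2emoji number out) := by unfold Spec_int2emoji; infer_instance

-- ===== CLAIM (what is proved, stated in full; the proofs are below) =====
def Claim_equal_int2emoji : Prop := ∀ (number : Int), Dom_int2emoji number → Spec_int2emoji number (int2emoji number)

-- ===== LEMMAS AND PROOFS =====

-- A's loop produces the little-endian decimal digits of number.toNat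
theorem digitsA_eq (number : Int) :
    int2emojiDigitsA number = (Nat.digits 10 number.toNat).map Int.ofNat := by
  by_cases h : 0 < number
  · rw [int2emojiDigitsA]
    simp only [h, dif_pos]
    rw [digitsA_eq (PySem.Int.floordiv number 10)]
    rw [PySem.Int.floordiv_eq_ediv_of_pos (by norm_num),
        PySem.Int.mod_eq_emod_of_pos (by norm_num)]
    rw [Nat.digits_def' (n := number.toNat) (by norm_num) (by omega)]
    have e2 : (number / 10).toNat = number.toNat / 10 := by omega
    rw [e2]
    simp only [List.map_cons]
    congr 1
    simp only [Int.ofNat_eq_natCast]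
    omega
  · rw [int2emojiDigitsA]
    simp only [h, dif_neg, not_false_iff]
    have : number.toNat = 0 := by omega
    simp [this]
termination_by number.toNat
decreasing_by
  rw [PySem.Int.floordiv_eq_ediv_of_pos (by norm_num)]
  omega

-- Nat.toDigits is the reversed little-endian digit list rendered with digitChar
theorem toDigits_eq_digits (m : Nat) (hm : 0 < m) :
    Nat.toDigits 10 m = ((Nat.digits 10 m).reverse.map Nat.digitChar) := by
  by_cases h : m < 10
  · rw [Nat.toDigits_of_lt_base h]
    rw [Nat.digits_def' (b := 10) (by norm_num) hm]
    have : Nat.digits 10 (m / 10) = [] := by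
      have : m / 10 = 0 := by omega
      simp [this]
    have hmod : m % 10 = m := Nat.mod_eq_of_lt h
    simp [this, hmod]
  · rw [Nat.toDigits_of_base_le (by norm_num) (by omega)]
    rw [toDigits_eq_digits (m / 10) (by omega)]
    rw [Nat.digits_def' (b := 10) (by norm_num) hm]
    simp

-- shifting the accumulator out of a string-concatenation foldl
theorem strfoldl_shift (L : List String) (s : String) :
    L.foldl (fun r t => r ++ t) s = s ++ L.foldl (fun r t => r ++ t) "" := by
  induction L generalizing s with
  | nil => simp
  | cons x xs ih =>
    simp only [List.foldl_cons]
    rw [ih (s ++ x), ih ("" ++ x)]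
    simp [String.append_assoc]

-- folding string-append over a list is the join of the mapped list
theorem foldl_append_join (f : Int → String) (L : List Int) (s : String) :
    L.foldl (fun acc i => acc ++ f i) s = s ++ String.join (L.map f) := by
  induction L generalizing s with
  | nil => simp [String.join]
  | cons x xs ih =>
    simp only [List.foldl_cons, List.map_cons]
    rw [ih (s ++ f x)]
    simp only [String.join, List.foldl_cons]
    rw [strfoldl_shift (List.map f xs) ("" ++ f x)]
    simp [String.append_assoc]

-- the two per-digit renderings agree on decimal digits
theorem cell_eq (d : Nat) (hd : d < 10) :
    (PySem.List.pyGet? emojiA (Int.ofNat d)).getD "" =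
      (PySem.List.pyGet? emojiB ((d.digitChar.toNat : Int) - 48)).getD "" := by
  interval_cases d <;> rfl

theorem int2emoji_eq_alt (number : Int) : int2emoji number = int2emoji_alt number := by
  by_cases h : number ≤ 0
  · have hd : int2emojiDigitsA number = [] := by
      rw [int2emojiDigitsA]; simp [show ¬ 0 < number by omega]
    simp [int2emoji, int2emoji_alt, hd, h]
  · have hpos : 0 < number := by omega
    have hm : 0 < number.toNat := by omega
    unfold int2emoji int2emoji_alt
    rw [if_neg h]
    rw [digitsA_eq]
    have htc : (PySem.Int.toStr number).toList = Nat.toDigits 10 number.toNat := by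
      rw [PySem.Int.toList_toStr]
      unfold PySem.Int.toChars
      rw [if_neg (by omega)]
    rw [htc, toDigits_eq_digits number.toNat hm]
    rw [foldl_append_join]
    simp only [List.map_reverse, List.map_map]
    have hmap : List.map ((fun i => (PySem.List.pyGet? emojiA i).getD "") ∘ Int.ofNat)
          (Nat.digits 10 number.toNat)
        = List.map ((fun ch => (PySem.List.pyGet? emojiB ((ch.toNat : Int) - 48)).getD "") ∘ Nat.digitChar)
          (Nat.digits 10 number.toNat) := by
      apply List.map_congr_left
      intro d hd
      exact cell_eq d (Nat.digits_lt_base (by norm_num) hd)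
    rw [hmap]
    simp

-- ===== VERDICT (by name: the statement is the Claim_ definition above) =====
theorem int2emoji_spec : Claim_equal_int2emoji := by
  intro number _
  unfold Spec_int2emoji
  exact int2emoji_eq_alt number
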